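-- pv_equiv track=rewrite | github.com/radurevutchi/crosswords | crossword_comparison.py | center_grid_with_black_border
-- ===== SOURCE A (Python) =====
-- def center_grid_with_black_border(grid, target_size, target_black_percentage=20):
--     """Center the content of a grid within target_size, filling edges with black squares."""
--     if not grid:
--         return [["#" for _ in range(target_size)] for _ in range(target_size)]
--
--     # Convert to list if needed
--     if hasattr(grid, "tolist"):
--         grid = grid.tolist()
--
--     rows = len(grid)
--     cols = len(grid[0]) if rows > 0 else 0
--
--     # Find bounding box of actual content (letters)
--     min_row, max_row = rows, -1
--     min_col, max_col = cols, -1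
--
--     for i in range(rows):
--         for j in range(cols):
--             cell = grid[i][j]
--             if cell and cell not in ["#", " ", ".", None, "", 0]:
--                 min_row = min(min_row, i)
--                 max_row = max(max_row, i)
--                 min_col = min(min_col, j)
--                 max_col = max(max_col, j)
--
--     if max_row < 0:  # No content found
--         return [["#" for _ in range(target_size)] for _ in range(target_size)]
--
--     # Calculate content dimensions
--     content_height = max_row - min_row + 1
--     content_width = max_col - min_col + 1
--
--     # Calculate offset to center content
--     offset_row = (target_size - content_height) // 2
--     offset_col = (target_size - content_width) // 2
--
--     # Create new grid with black background
--     result = [["#" for _ in range(target_size)] for _ in range(target_size)]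
--
--     # Copy content to centered position
--     for i in range(min_row, max_row + 1):
--         for j in range(min_col, max_col + 1):
--             cell = grid[i][j]
--             new_i = offset_row + (i - min_row)
--             new_j = offset_col + (j - min_col)
--             if 0 <= new_i < target_size and 0 <= new_j < target_size:
--                 if cell and cell not in ["#", " ", ".", None, "", 0]:
--                     result[new_i][new_j] = str(cell)
--
--     return result
-- ===== SOURCE B (Python) =====
-- def center_grid_with_black_border(grid, target_size, target_black_percentage=20):
--     """Center the content of a grid within target_size, filling edges with black squares.
--
--     One collect pass: gather every content cell as (i, j, str(cell)) while scanning the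
--     grid once, take the bounding box from the collected list, then place the cells."""
--     if not grid:
--         return [["#"] * target_size for _ in range(target_size)]
--
--     if hasattr(grid, "tolist"):
--         grid = grid.tolist()
--
--     cols = len(grid[0])
--     cells = []
--     for i, row in enumerate(grid):
--         for j in range(cols):
--             cell = row[j]
--             if cell and cell not in ("#", " ", ".", None, "", 0):
--                 cells.append((i, j, str(cell)))
--
--     if not cells:  # No content found
--         return [["#"] * target_size for _ in range(target_size)]
--
--     min_row = min(c[0] for c in cells)
--     max_row = max(c[0] for c in cells)
--     min_col = min(c[1] for c in cells)
--     max_col = max(c[1] for c in cells)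
--
--     offset_row = (target_size - (max_row - min_row + 1)) // 2
--     offset_col = (target_size - (max_col - min_col + 1)) // 2
--
--     result = [["#"] * target_size for _ in range(target_size)]
--     for i, j, value in cells:
--         new_i = offset_row + (i - min_row)
--         new_j = offset_col + (j - min_col)
--         if 0 <= new_i < target_size and 0 <= new_j < target_size:
--             result[new_i][new_j] = value
--     return result
-- ===== Notes on version B (the rewrite author's own statement) =====
-- stated objective: alternative
-- what changed: B replaces A's second rectangular rescan (re-reading grid cells over the bounding box and re-testing the content predicate) with a single collect pass that gathers every content cell as (i, j, str(cell)) into a list, takes the bounding box with min()/max() over that list, and then places the collected cells directly.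
import Mathlib
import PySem

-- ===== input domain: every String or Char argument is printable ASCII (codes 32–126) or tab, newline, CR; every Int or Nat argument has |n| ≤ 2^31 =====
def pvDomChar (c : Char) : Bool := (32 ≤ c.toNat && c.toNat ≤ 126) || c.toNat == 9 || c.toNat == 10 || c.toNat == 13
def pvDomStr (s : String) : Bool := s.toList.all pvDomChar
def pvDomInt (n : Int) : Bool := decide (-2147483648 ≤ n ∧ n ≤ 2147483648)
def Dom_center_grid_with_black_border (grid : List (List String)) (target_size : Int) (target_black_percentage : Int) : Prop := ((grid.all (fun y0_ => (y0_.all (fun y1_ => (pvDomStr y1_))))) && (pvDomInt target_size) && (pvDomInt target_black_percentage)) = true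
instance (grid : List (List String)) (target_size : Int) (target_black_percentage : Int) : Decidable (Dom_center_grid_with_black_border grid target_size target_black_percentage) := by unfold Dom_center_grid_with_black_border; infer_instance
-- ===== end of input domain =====

-- B replaces A's second rectangular rescan with a single collect pass over the grid
-- (content cells gathered once into a list, bounding box read off that list with min/max,
-- cells then placed directly); same return value on every non-raising input (objective: alternative).

-- `cell and cell not in ["#", " ", ".", None, "", 0]` on a str cell: None and 0 never
-- compare equal to a str, so only the string members matter; str truthiness is ≠ "".
def pvContent (c : String) : Bool := (!(c == "")) && (!(c == "#" || c == " " || c == "." || c == ""))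

-- grid[i][j] (only evaluated with indexes in range under Pre_)
def pvCell (grid : List (List String)) (i j : Int) : String :=
  PySem.List.pyGetD (PySem.List.pyGetD grid i []) j ""

-- result[i][j] = v  (only evaluated with 0 ≤ i, 0 ≤ j under the ports' bounds guards)
def pvSet2 (g : List (List String)) (i j : Int) (v : String) : List (List String) :=
  g.modify i.toNat (fun row => row.set j.toNat v)

-- A's `[["#" for _ in range(target_size)] for _ in range(target_size)]`
def pvBlack (ts : Int) : List (List String) :=
  (PySem.List.pyRange 0 ts 1).map (fun _ => (PySem.List.pyRange 0 ts 1).map (fun _ => "#"))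

-- B's `[["#"] * target_size for _ in range(target_size)]`
def pvBlackB (ts : Int) : List (List String) :=
  (PySem.List.pyRange 0 ts 1).map (fun _ => List.replicate ts.toNat "#")

-- ===== PORT A =====
def center_grid_with_black_border (grid : List (List String)) (target_size : Int) (target_black_percentage : Int) : List (List String) :=
  if grid = [] then pvBlack target_size
  else
    let rows : Int := PySem.List.len grid
    let cols : Int := if 0 < rows then PySem.List.len (grid.headD []) else 0
    let bb : Int × Int × Int × Int :=
      (PySem.List.pyRange 0 rows 1).foldl (fun bb i =>
        (PySem.List.pyRange 0 cols 1).foldl (fun bb j =>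
          let cell := pvCell grid i j
          if pvContent cell then
            (min bb.1 i, max bb.2.1 i, min bb.2.2.1 j, max bb.2.2.2 j)
          else bb) bb)
        (rows, -1, cols, -1)
    if bb.2.1 < 0 then pvBlack target_size
    else
      let content_height := bb.2.1 - bb.1 + 1
      let content_width := bb.2.2.2 - bb.2.2.1 + 1
      let offset_row := PySem.Int.floordiv (target_size - content_height) 2
      let offset_col := PySem.Int.floordiv (target_size - content_width) 2
      (PySem.List.pyRange bb.1 (bb.2.1 + 1) 1).foldl (fun res i =>
        (PySem.List.pyRange bb.2.2.1 (bb.2.2.2 + 1) 1).foldl (fun res j =>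
          let cell := pvCell grid i j
          let ni := offset_row + (i - bb.1)
          let nj := offset_col + (j - bb.2.2.1)
          if 0 ≤ ni ∧ ni < target_size ∧ 0 ≤ nj ∧ nj < target_size then
            if pvContent cell then pvSet2 res ni nj cell else res
          else res) res) (pvBlack target_size)

-- ===== PORT B =====
def center_grid_with_black_border_alt (grid : List (List String)) (target_size : Int) (target_black_percentage : Int) : List (List String) :=
  if grid = [] then pvBlackB target_size
  else
    let cols : Int := PySem.List.len (grid.headD [])
    let cells : List (Int × Int × String) :=
      (PySem.List.enumerate grid).flatMap (fun p =>
        (PySem.List.pyRange 0 cols 1).filterMap (fun j =>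
          let cell := PySem.List.pyGetD p.2 j ""
          if pvContent cell then some (p.1, j, cell) else none))
    if cells = [] then pvBlackB target_size
    else
      let min_row := (PySem.List.min? (cells.map (fun c => c.1)) (fun y => y)).getD 0
      let max_row := (PySem.List.max? (cells.map (fun c => c.1)) (fun y => y)).getD 0
      let min_col := (PySem.List.min? (cells.map (fun c => c.2.1)) (fun y => y)).getD 0
      let max_col := (PySem.List.max? (cells.map (fun c => c.2.1)) (fun y => y)).getD 0
      let offset_row := PySem.Int.floordiv (target_size - (max_row - min_row + 1)) 2
      let offset_col := PySem.Int.floordiv (target_size - (max_col - min_col + 1)) 2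
      cells.foldl (fun res c =>
        let ni := offset_row + (c.1 - min_row)
        let nj := offset_col + (c.2.1 - min_col)
        if 0 ≤ ni ∧ ni < target_size ∧ 0 ≤ nj ∧ nj < target_size then
          pvSet2 res ni nj c.2.2
        else res)
        (pvBlackB target_size)

-- ===== PRECONDITION & SPEC =====
-- Pre_ excludes exactly the inputs on which the Python A raises IndexError: a grid whose
-- later row is shorter than row 0 (both loops read grid[i][j] for every j < len(grid[0])).
def Pre_center_grid_with_black_border (grid : List (List String)) (target_size : Int) (target_black_percentage : Int) : Prop :=
  ∀ row ∈ grid, (grid.headD []).length ≤ row.length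
instance (grid : List (List String)) (target_size : Int) (target_black_percentage : Int) : Decidable (Pre_center_grid_with_black_border grid target_size target_black_percentage) := by unfold Pre_center_grid_with_black_border; infer_instance
def pvWitness_center_grid_with_black_border : List (List String) × Int × Int :=
  ([["a", "#"], ["#", "b"]], 4, 20)
def Spec_center_grid_with_black_border (grid : List (List String)) (target_size : Int) (target_black_percentage : Int) (out : List (List String)) : Prop := out = center_grid_with_black_border_alt grid target_size target_black_percentage
instance (grid : List (List String)) (target_size : Int) (target_black_percentage : Int) (out : List (List String)) : Decidable (Spec_center_grid_with_black_border grid target_size target_black_percentage out) := by unfold Spec_center_grid_with_black_border; infer_instance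

-- ===== CLAIM (what is proved, stated in full; the proofs are below) =====
def Claim_equal_center_grid_with_black_border : Prop := ∀ (grid : List (List String)) (target_size : Int) (target_black_percentage : Int), Dom_center_grid_with_black_border grid target_size target_black_percentage → Pre_center_grid_with_black_border grid target_size target_black_percentage → Spec_center_grid_with_black_border grid target_size target_black_percentage (center_grid_with_black_border grid target_size target_black_percentage)

-- ===== LEMMAS AND PROOFS =====

theorem pvBlack_eq_pvBlackB (ts : Int) : pvBlack ts = pvBlackB ts := by
  unfold pvBlack pvBlackB
  have h : ((PySem.List.pyRange 0 ts 1).map (fun _ => ("#" : String))) = List.replicate ts.toNat "#" := by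
    rw [List.map_const', PySem.List.length_pyRange_one]
    norm_num
  rw [h]

-- the per-row list of content cells of row i, columns lo ≤ j < hi
def pvRowCells (grid : List (List String)) (lo hi i : Int) : List (Int × Int × String) :=
  (PySem.List.pyRange lo hi 1).filterMap (fun j =>
    if pvContent (pvCell grid i j) then some (i, j, pvCell grid i j) else none)

-- all content cells of the grid, row-major
def pvCells (grid : List (List String)) : List (Int × Int × String) :=
  (PySem.List.pyRange 0 (PySem.List.len grid) 1).flatMap
    (fun i => pvRowCells grid 0 (PySem.List.len (grid.headD [])) i)

theorem pvRowCells_foldl {γ : Type} (grid : List (List String)) (lo hi i : Int)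
    (g : γ → Int × Int × String → γ) (s : γ) :
    (pvRowCells grid lo hi i).foldl g s
      = (PySem.List.pyRange lo hi 1).foldl
          (fun s j => if pvContent (pvCell grid i j) then g s (i, j, pvCell grid i j) else s) s := by
  unfold pvRowCells
  rw [List.foldl_filterMap]
  congr 1
  funext s j
  by_cases h : pvContent (pvCell grid i j) <;> simp [h]

theorem pvCells_foldl {γ : Type} (grid : List (List String)) (g : γ → Int × Int × String → γ) (s : γ) :
    (pvCells grid).foldl g s
      = (PySem.List.pyRange 0 (PySem.List.len grid) 1).foldl
          (fun s i => (PySem.List.pyRange 0 (PySem.List.len (grid.headD [])) 1).foldl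
            (fun s j => if pvContent (pvCell grid i j) then g s (i, j, pvCell grid i j) else s) s) s := by
  unfold pvCells
  rw [List.foldl_flatMap]
  simp only [pvRowCells_foldl]

theorem mem_pvRowCells {grid : List (List String)} {lo hi i : Int} {t : Int × Int × String}
    (h : t ∈ pvRowCells grid lo hi i) :
    t.1 = i ∧ lo ≤ t.2.1 ∧ t.2.1 < hi ∧ pvContent (pvCell grid i t.2.1) = true
      ∧ t.2.2 = pvCell grid i t.2.1 := by
  unfold pvRowCells at h
  rw [List.mem_filterMap] at h
  obtain ⟨j, hj, hsome⟩ := h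
  rw [PySem.List.mem_pyRange_one] at hj
  by_cases hc : pvContent (pvCell grid i j)
  · simp [hc] at hsome
    subst hsome
    exact ⟨rfl, hj.1, hj.2, hc, rfl⟩
  · simp [hc] at hsome

theorem mem_pvCells {grid : List (List String)} {t : Int × Int × String}
    (h : t ∈ pvCells grid) :
    0 ≤ t.1 ∧ t.1 < PySem.List.len grid ∧ 0 ≤ t.2.1 ∧ t.2.1 < PySem.List.len (grid.headD [])
      ∧ pvContent (pvCell grid t.1 t.2.1) = true ∧ t.2.2 = pvCell grid t.1 t.2.1 := by
  unfold pvCells at h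
  rw [List.mem_flatMap] at h
  obtain ⟨i, hi, ht⟩ := h
  rw [PySem.List.mem_pyRange_one] at hi
  obtain ⟨h1, h2, h3, h4, h5⟩ := mem_pvRowCells ht
  subst h1
  exact ⟨hi.1, hi.2, h2, h3, h4, h5⟩

-- ---- Int fold min/max helpers ----
theorem pvFoldl_min_le_init (l : List Int) (a : Int) : l.foldl min a ≤ a := by
  induction l generalizing a with
  | nil => simp
  | cons x t ih => simpa using le_trans (ih (min a x)) (min_le_left a x)

theorem pvLe_foldl_max_init (l : List Int) (a : Int) : a ≤ l.foldl max a := by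
  induction l generalizing a with
  | nil => simp
  | cons x t ih => simpa using le_trans (le_max_left a x) (ih (max a x))

theorem pvFoldl_min_le_mem {l : List Int} {x : Int} (h : x ∈ l) (a : Int) : l.foldl min a ≤ x := by
  induction l generalizing a with
  | nil => simp at h
  | cons y t ih =>
    rcases List.mem_cons.mp h with rfl | h'
    · simpa using le_trans (pvFoldl_min_le_init t (min a x)) (min_le_right a x)
    · simpa using ih h' (min a y)

theorem pvMem_le_foldl_max {l : List Int} {x : Int} (h : x ∈ l) (a : Int) : x ≤ l.foldl max a := by
  induction l generalizing a with
  | nil => simp at h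
  | cons y t ih =>
    rcases List.mem_cons.mp h with rfl | h'
    · simpa using le_trans (le_max_right a x) (pvLe_foldl_max_init t (max a x))
    · simpa using ih h' (max a y)

theorem pvFoldl_min_lb {l : List Int} {c : Int} (h : ∀ y ∈ l, c ≤ y) {a : Int} (ha : c ≤ a) :
    c ≤ l.foldl min a := by
  induction l generalizing a with
  | nil => simpa
  | cons x t ih =>
    simp only [List.foldl_cons]
    exact ih (fun y hy => h y (List.mem_cons_of_mem _ hy)) (le_min ha (h x List.mem_cons_self))

theorem pvFoldl_max_ub {l : List Int} {c : Int} (h : ∀ y ∈ l, y ≤ c) {a : Int} (ha : a ≤ c) :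
    l.foldl max a ≤ c := by
  induction l generalizing a with
  | nil => simpa
  | cons x t ih =>
    simp only [List.foldl_cons]
    exact ih (fun y hy => h y (List.mem_cons_of_mem _ hy)) (max_le ha (h x List.mem_cons_self))

theorem pvFoldl_min_cons_absorb {x a : Int} (t : List Int) (h : x ≤ a) :
    (x :: t).foldl min a = t.foldl min x := by
  simp [min_eq_right h]

theorem pvFoldl_max_cons_absorb {x a : Int} (t : List Int) (h : a ≤ x) :
    (x :: t).foldl max a = t.foldl max x := by
  simp [max_eq_right h]

-- the bbox update, and its componentwise characterisation
def pvBBUpd (bb : Int × Int × Int × Int) (t : Int × Int × String) : Int × Int × Int × Int :=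
  (min bb.1 t.1, max bb.2.1 t.1, min bb.2.2.1 t.2.1, max bb.2.2.2 t.2.1)

theorem pvBBFold_eq (l : List (Int × Int × String)) (bb : Int × Int × Int × Int) :
    l.foldl pvBBUpd bb
      = ((l.map (fun t => t.1)).foldl min bb.1,
         (l.map (fun t => t.1)).foldl max bb.2.1,
         (l.map (fun t => t.2.1)).foldl min bb.2.2.1,
         (l.map (fun t => t.2.1)).foldl max bb.2.2.2) := by
  induction l generalizing bb with
  | nil => simp
  | cons x t ih => simp [pvBBUpd, ih]

theorem pvFlatMap_congr {α β : Type} {l : List α} {f g : α → List β}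
    (h : ∀ x ∈ l, f x = g x) : l.flatMap f = l.flatMap g := by
  induction l with
  | nil => simp
  | cons x t ih =>
    simp only [List.flatMap_cons]
    rw [h x List.mem_cons_self, ih (fun y hy => h y (List.mem_cons_of_mem _ hy))]

theorem pvMem_pvCells_of (grid : List (List String)) (i j : Int)
    (h0 : 0 ≤ i) (h1 : i < PySem.List.len grid)
    (h2 : 0 ≤ j) (h3 : j < PySem.List.len (grid.headD []))
    (hc : pvContent (pvCell grid i j) = true) :
    (i, j, pvCell grid i j) ∈ pvCells grid := by
  unfold pvCells pvRowCells
  rw [List.mem_flatMap]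
  refine ⟨i, PySem.List.mem_pyRange_one.mpr ⟨h0, h1⟩, ?_⟩
  rw [List.mem_filterMap]
  exact ⟨j, PySem.List.mem_pyRange_one.mpr ⟨h2, h3⟩, by simp [hc]⟩

theorem pvCells_rect (grid : List (List String)) (mr Mr mc Mc : Int)
    (h0r : 0 ≤ mr) (hrR : Mr < PySem.List.len grid) (hmM : mr ≤ Mr)
    (h0c : 0 ≤ mc) (hcC : Mc < PySem.List.len (grid.headD [])) (hmMc : mc ≤ Mc)
    (hB : ∀ i j : Int, 0 ≤ i → i < PySem.List.len grid → 0 ≤ j → j < PySem.List.len (grid.headD []) →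
      pvContent (pvCell grid i j) = true → mr ≤ i ∧ i ≤ Mr ∧ mc ≤ j ∧ j ≤ Mc) :
    pvCells grid = (PySem.List.pyRange mr (Mr + 1) 1).flatMap (fun i => pvRowCells grid mc (Mc + 1) i) := by
  unfold pvCells
  rw [PySem.List.pyRange_one_append 0 (Mr + 1) (PySem.List.len grid) (by linarith) (by linarith),
      PySem.List.pyRange_one_append 0 mr (Mr + 1) h0r (by linarith),
      List.flatMap_append, List.flatMap_append]
  have hnil1 : (PySem.List.pyRange 0 mr 1).flatMap
      (fun i => pvRowCells grid 0 (PySem.List.len (grid.headD [])) i) = [] := by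
    rw [List.flatMap_eq_nil_iff]
    intro i hi
    rw [PySem.List.mem_pyRange_one] at hi
    unfold pvRowCells
    rw [List.filterMap_eq_nil_iff]
    intro j hj
    rw [PySem.List.mem_pyRange_one] at hj
    by_cases hcnt : pvContent (pvCell grid i j) = true
    · exact absurd (hB i j hi.1 (by linarith) hj.1 hj.2 hcnt).1 (by linarith)
    · simp [hcnt]
  have hnil3 : (PySem.List.pyRange (Mr + 1) (PySem.List.len grid) 1).flatMap
      (fun i => pvRowCells grid 0 (PySem.List.len (grid.headD [])) i) = [] := by
    rw [List.flatMap_eq_nil_iff]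
    intro i hi
    rw [PySem.List.mem_pyRange_one] at hi
    unfold pvRowCells
    rw [List.filterMap_eq_nil_iff]
    intro j hj
    rw [PySem.List.mem_pyRange_one] at hj
    by_cases hcnt : pvContent (pvCell grid i j) = true
    · exact absurd (hB i j (by linarith) hi.2 hj.1 hj.2 hcnt).2.1 (by linarith)
    · simp [hcnt]
  have hmid : (PySem.List.pyRange mr (Mr + 1) 1).flatMap
      (fun i => pvRowCells grid 0 (PySem.List.len (grid.headD [])) i)
      = (PySem.List.pyRange mr (Mr + 1) 1).flatMap (fun i => pvRowCells grid mc (Mc + 1) i) := by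
    apply pvFlatMap_congr
    intro i hi
    rw [PySem.List.mem_pyRange_one] at hi
    unfold pvRowCells
    rw [PySem.List.pyRange_one_append 0 (Mc + 1) (PySem.List.len (grid.headD [])) (by linarith) (by linarith),
        PySem.List.pyRange_one_append 0 mc (Mc + 1) h0c (by linarith),
        List.filterMap_append, List.filterMap_append]
    have hn1 : (PySem.List.pyRange 0 mc 1).filterMap
        (fun j => if pvContent (pvCell grid i j) then some (i, j, pvCell grid i j) else none) = [] := by
      rw [List.filterMap_eq_nil_iff]
      intro j hj
      rw [PySem.List.mem_pyRange_one] at hj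
      by_cases hcnt : pvContent (pvCell grid i j) = true
      · exact absurd (hB i j (by linarith) (by linarith) hj.1 (by linarith) hcnt).2.2.1 (by linarith)
      · simp [hcnt]
    have hn3 : (PySem.List.pyRange (Mc + 1) (PySem.List.len (grid.headD [])) 1).filterMap
        (fun j => if pvContent (pvCell grid i j) then some (i, j, pvCell grid i j) else none) = [] := by
      rw [List.filterMap_eq_nil_iff]
      intro j hj
      rw [PySem.List.mem_pyRange_one] at hj
      by_cases hcnt : pvContent (pvCell grid i j) = true
      · exact absurd (hB i j (by linarith) (by linarith) (by linarith) hj.2 hcnt).2.2.2 (by linarith)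
      · simp [hcnt]
    rw [hn1, hn3]
    simp
  rw [hnil1, hnil3, hmid]
  simp

theorem pvCellsB_eq (grid : List (List String)) :
    (PySem.List.enumerate grid).flatMap (fun p =>
      (PySem.List.pyRange 0 (PySem.List.len (grid.headD [])) 1).filterMap (fun j =>
        if pvContent (PySem.List.pyGetD p.2 j "") = true then some (p.1, j, PySem.List.pyGetD p.2 j "")
        else none)) = pvCells grid := by
  rw [PySem.List.enumerate_eq_map_pyRange grid ([] : List String), List.flatMap_map]
  unfold pvCells pvRowCells pvCell
  rfl

theorem pvBB_nested (grid : List (List String)) (init : Int × Int × Int × Int) :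
    (PySem.List.pyRange 0 (PySem.List.len grid) 1).foldl
      (fun bb i => (PySem.List.pyRange 0 (PySem.List.len (grid.headD [])) 1).foldl
        (fun bb j => if pvContent (pvCell grid i j) = true then
            (min bb.1 i, max bb.2.1 i, min bb.2.2.1 j, max bb.2.2.2 j) else bb) bb) init
    = (pvCells grid).foldl pvBBUpd init := by
  rw [pvCells_foldl]
  rfl

theorem pvWrite_nested (grid : List (List String)) (ts mr Mr mc Mc orow ocol : Int) (init : List (List String)) :
    (PySem.List.pyRange mr (Mr + 1) 1).foldl
      (fun res i => (PySem.List.pyRange mc (Mc + 1) 1).foldl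
        (fun res j =>
          if 0 ≤ orow + (i - mr) ∧ orow + (i - mr) < ts ∧ 0 ≤ ocol + (j - mc) ∧ ocol + (j - mc) < ts then
            if pvContent (pvCell grid i j) = true then
              pvSet2 res (orow + (i - mr)) (ocol + (j - mc)) (pvCell grid i j)
            else res
          else res) res) init
    = ((PySem.List.pyRange mr (Mr + 1) 1).flatMap (fun i => pvRowCells grid mc (Mc + 1) i)).foldl
        (fun res c =>
          if 0 ≤ orow + (c.1 - mr) ∧ orow + (c.1 - mr) < ts ∧ 0 ≤ ocol + (c.2.1 - mc) ∧ ocol + (c.2.1 - mc) < ts then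
            pvSet2 res (orow + (c.1 - mr)) (ocol + (c.2.1 - mc)) c.2.2
          else res) init := by
  rw [List.foldl_flatMap]
  simp only [pvRowCells_foldl]
  congr 1
  funext res i
  congr 1
  funext res j
  by_cases hc : pvContent (pvCell grid i j) = true <;>
    by_cases hb : 0 ≤ orow + (i - mr) ∧ orow + (i - mr) < ts ∧ 0 ≤ ocol + (j - mc) ∧ ocol + (j - mc) < ts <;>
    simp [hc, hb]

-- ===== VERDICT (by name: the statement is the Claim_ definition above) =====
theorem center_grid_with_black_border_spec : Claim_equal_center_grid_with_black_border := by
  intro grid target_size target_black_percentage _hdom hpre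
  unfold Spec_center_grid_with_black_border
  by_cases hg : grid = []
  · simp [center_grid_with_black_border, center_grid_with_black_border_alt, hg, pvBlack_eq_pvBlackB]
  · have hrows : 0 < PySem.List.len grid := by
      simp [PySem.List.len_eq]
      exact List.length_pos_of_ne_nil hg
    simp only [center_grid_with_black_border, center_grid_with_black_border_alt, if_neg hg, if_pos hrows]
    rw [pvCellsB_eq, pvBB_nested]
    rcases hcl : pvCells grid with _ | ⟨c0, cs⟩
    · simp [pvBlack_eq_pvBlackB]
    · simp only [pvBBFold_eq, List.map_cons]
      have hc0 : c0 ∈ pvCells grid := by rw [hcl]; exact List.mem_cons_self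
      obtain ⟨hc01, hc02, hc03, hc04, -, -⟩ := mem_pvCells hc0
      have hcs : ∀ t ∈ cs, 0 ≤ t.1 ∧ t.1 < PySem.List.len grid ∧ 0 ≤ t.2.1 ∧
          t.2.1 < PySem.List.len (grid.headD []) := by
        intro t ht
        obtain ⟨a1, a2, a3, a4, -, -⟩ :=
          mem_pvCells (by rw [hcl]; exact List.mem_cons_of_mem _ ht : t ∈ pvCells grid)
        exact ⟨a1, a2, a3, a4⟩
      rw [pvFoldl_min_cons_absorb (cs.map (fun t => t.1)) (le_of_lt hc02),
          pvFoldl_max_cons_absorb (cs.map (fun t => t.1)) (by linarith : (-1 : Int) ≤ c0.1),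
          pvFoldl_min_cons_absorb (cs.map (fun t => t.2.1)) (le_of_lt hc04),
          pvFoldl_max_cons_absorb (cs.map (fun t => t.2.1)) (by linarith : (-1 : Int) ≤ c0.2.1),
          PySem.List.min?_id_cons, PySem.List.max?_id_cons, PySem.List.min?_id_cons,
          PySem.List.max?_id_cons, Option.getD_some, Option.getD_some, Option.getD_some,
          Option.getD_some]
      -- abbreviations for the four bounding-box numbers
      have hmrle : (cs.map (fun t => t.1)).foldl min c0.1 ≤ c0.1 := pvFoldl_min_le_init _ _
      have hleMr : c0.1 ≤ (cs.map (fun t => t.1)).foldl max c0.1 := pvLe_foldl_max_init _ _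
      have hmcle : (cs.map (fun t => t.2.1)).foldl min c0.2.1 ≤ c0.2.1 := pvFoldl_min_le_init _ _
      have hleMc : c0.2.1 ≤ (cs.map (fun t => t.2.1)).foldl max c0.2.1 := pvLe_foldl_max_init _ _
      have h0mr : 0 ≤ (cs.map (fun t => t.1)).foldl min c0.1 :=
        pvFoldl_min_lb (fun y hy => by
          obtain ⟨t, ht, rfl⟩ := List.mem_map.mp hy; exact (hcs t ht).1) hc01
      have h0mc : 0 ≤ (cs.map (fun t => t.2.1)).foldl min c0.2.1 :=
        pvFoldl_min_lb (fun y hy => by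
          obtain ⟨t, ht, rfl⟩ := List.mem_map.mp hy; exact (hcs t ht).2.2.1) hc03
      have hMrlt : (cs.map (fun t => t.1)).foldl max c0.1 < PySem.List.len grid := by
        have : (cs.map (fun t => t.1)).foldl max c0.1 ≤ PySem.List.len grid - 1 :=
          pvFoldl_max_ub (fun y hy => by
            obtain ⟨t, ht, rfl⟩ := List.mem_map.mp hy; linarith [(hcs t ht).2.1]) (by linarith)
        linarith
      have hMclt : (cs.map (fun t => t.2.1)).foldl max c0.2.1 < PySem.List.len (grid.headD []) := by
        have : (cs.map (fun t => t.2.1)).foldl max c0.2.1 ≤ PySem.List.len (grid.headD []) - 1 :=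
          pvFoldl_max_ub (fun y hy => by
            obtain ⟨t, ht, rfl⟩ := List.mem_map.mp hy; linarith [(hcs t ht).2.2.2]) (by linarith)
        linarith
      have hbound : ∀ t ∈ pvCells grid,
          (cs.map (fun t => t.1)).foldl min c0.1 ≤ t.1 ∧
          t.1 ≤ (cs.map (fun t => t.1)).foldl max c0.1 ∧
          (cs.map (fun t => t.2.1)).foldl min c0.2.1 ≤ t.2.1 ∧
          t.2.1 ≤ (cs.map (fun t => t.2.1)).foldl max c0.2.1 := by
        intro t ht
        rw [hcl] at ht
        rcases List.mem_cons.mp ht with rfl | ht'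
        · exact ⟨hmrle, hleMr, hmcle, hleMc⟩
        · exact ⟨pvFoldl_min_le_mem (List.mem_map_of_mem ht') _,
            pvMem_le_foldl_max (List.mem_map_of_mem ht') _,
            pvFoldl_min_le_mem (List.mem_map_of_mem ht') _,
            pvMem_le_foldl_max (List.mem_map_of_mem ht') _⟩
      have hrect := pvCells_rect grid
        ((cs.map (fun t => t.1)).foldl min c0.1) ((cs.map (fun t => t.1)).foldl max c0.1)
        ((cs.map (fun t => t.2.1)).foldl min c0.2.1) ((cs.map (fun t => t.2.1)).foldl max c0.2.1)
        h0mr hMrlt (le_trans hmrle hleMr) h0mc hMclt (le_trans hmcle hleMc)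
        (fun i j a0 a1 a2 a3 hcnt => hbound _ (pvMem_pvCells_of grid i j a0 a1 a2 a3 hcnt))
      rw [hcl] at hrect
      rw [if_neg (not_lt.mpr (le_trans hc01 hleMr)), if_neg (List.cons_ne_nil _ _),
          pvBlack_eq_pvBlackB, hrect, pvWrite_nested]
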